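-- pv_equiv track=rewrite | github.com/labtanaka/schloissnig_axolotl | scripts/findTADhomologs.py | findMatchingTAD
-- ===== SOURCE A (Python) =====
-- def findMatchingTAD(queryGenes, targetGenes):
--     tadlist = []
--     for geneID in queryGenes:
--         tads = targetGenes.get(geneID)
--         if tads:
--             for tad in tads:
--                 tadlist.append(tad)
--     # Now find the most common TAD
--     nMax = 0
--     best = None
--     for tad in tadlist:
--         n = tadlist.count(tad)
--         if n > nMax:
--             nMax = n
--             best = tad
--     return(best)
-- ===== SOURCE B (Python) =====
-- def findMatchingTAD(queryGenes, targetGenes):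
--     # Successive partition: repeatedly take the first TAD still present, count its
--     # occurrences as the length drop after stripping them all, and shrink the list;
--     # each distinct TAD is visited once, in first-appearance order, strict '>' keeps ties.
--     rest = [tad for g in queryGenes for tad in (targetGenes.get(g) or ())]
--     best = None
--     nBest = 0
--     while rest:
--         t = rest[0]
--         smaller = [x for x in rest if x != t]
--         c = len(rest) - len(smaller)
--         if c > nBest:
--             nBest = c
--             best = t
--         rest = smaller
--     return best
-- ===== Notes on version B (the rewrite author's own statement) =====
-- stated objective: faster
-- what changed: Replaces A's scan that calls tadlist.count(tad) for every element of the full matched list (always quadratic) with a successive-partition loop: repeatedly take the first TAD still present, strip all its occurrences from the shrinking list, and count them as the length drop, so each distinct TAD is processed exactly once in first-appearance order with strict '>' keeping ties.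
import Mathlib
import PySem

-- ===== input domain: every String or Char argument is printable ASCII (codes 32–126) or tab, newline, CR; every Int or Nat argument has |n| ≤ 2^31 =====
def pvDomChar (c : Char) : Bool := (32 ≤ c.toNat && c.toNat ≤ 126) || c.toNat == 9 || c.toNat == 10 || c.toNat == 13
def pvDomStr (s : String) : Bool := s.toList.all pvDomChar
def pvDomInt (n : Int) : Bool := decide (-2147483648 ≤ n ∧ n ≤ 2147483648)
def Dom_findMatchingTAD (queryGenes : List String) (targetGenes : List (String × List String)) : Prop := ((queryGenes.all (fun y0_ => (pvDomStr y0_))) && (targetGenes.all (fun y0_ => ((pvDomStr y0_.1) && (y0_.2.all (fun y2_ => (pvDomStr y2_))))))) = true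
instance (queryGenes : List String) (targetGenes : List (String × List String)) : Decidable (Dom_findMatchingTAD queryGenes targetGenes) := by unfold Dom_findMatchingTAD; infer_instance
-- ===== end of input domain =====

-- B replaces A's per-element tadlist.count rescans by a successive-partition loop that strips
-- each distinct TAD's occurrences once, counting them by the length drop (objective: faster).

-- ===== PORT A =====
def findMatchingTAD (queryGenes : List String) (targetGenes : List (String × List String)) : Option String :=
  let tadlist : List String := queryGenes.foldl (fun acc geneID =>
    match (PySem.Dict.mk targetGenes).get? geneID with
    | none => acc
    | some tads => if tads.isEmpty then acc else tads.foldl (fun a t => a ++ [t]) acc) []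
  let r := tadlist.foldl (fun acc tad =>
    let n : Int := (PySem.List.count tadlist tad : Nat)
    if n > acc.1 then (n, some tad) else acc) ((0 : Int), (none : Option String))
  r.2

-- ===== PORT B =====
-- the while loop of Source B: successive partition over the shrinking list `rest`
def pvBestLoop : List String → Int → Option String → Option String
  | [], _, best => best
  | t :: xs, nBest, best =>
    let smaller := (t :: xs).filter (fun x => x ≠ t)
    let c : Int := (((t :: xs).length : Int) - (smaller.length : Int))
    if c > nBest then pvBestLoop smaller c (some t) else pvBestLoop smaller nBest best
termination_by rest _ _ => rest.length
decreasing_by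
  all_goals
    simp only [List.filter_cons, ne_eq, not_true_eq_false, decide_false,
      Bool.false_eq_true, if_false, List.length_cons]
    exact Nat.lt_succ_of_le (List.length_filter_le _ _)

def findMatchingTAD_alt (queryGenes : List String) (targetGenes : List (String × List String)) : Option String :=
  let tadlist : List String := queryGenes.flatMap (fun g => (((PySem.Dict.mk targetGenes).get? g).getD []))
  pvBestLoop tadlist 0 none

-- ===== PRECONDITION & SPEC =====
def Spec_findMatchingTAD (queryGenes : List String) (targetGenes : List (String × List String)) (out : Option String) : Prop := out = findMatchingTAD_alt queryGenes targetGenes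
instance (queryGenes : List String) (targetGenes : List (String × List String)) (out : Option String) : Decidable (Spec_findMatchingTAD queryGenes targetGenes out) := by unfold Spec_findMatchingTAD; infer_instance

-- ===== CLAIM (what is proved, stated in full; the proofs are below) =====
def Claim_equal_findMatchingTAD : Prop := ∀ (queryGenes : List String) (targetGenes : List (String × List String)), Dom_findMatchingTAD queryGenes targetGenes → Spec_findMatchingTAD queryGenes targetGenes (findMatchingTAD queryGenes targetGenes)

-- ===== LEMMAS AND PROOFS =====

-- the "running best with strict >" step, with count function c
def pvStep (c : String → Int) (acc : Int × Option String) (t : String) : Int × Option String :=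
  if c t > acc.1 then (c t, some t) else acc

theorem pvStep_fst_le (c : String → Int) (acc : Int × Option String) (t : String) :
    acc.1 ≤ (pvStep c acc t).1 := by
  unfold pvStep; split_ifs with h
  · dsimp; omega
  · exact le_refl _

theorem pvStep_fst_ge (c : String → Int) (acc : Int × Option String) (t : String) :
    c t ≤ (pvStep c acc t).1 := by
  unfold pvStep; split_ifs with h
  · dsimp; omega
  · omega

theorem pvStep_of_le (c : String → Int) (acc : Int × Option String) (t : String)
    (h : c t ≤ acc.1) : pvStep c acc t = acc := by
  unfold pvStep; split_ifs with h'
  · exact absurd h' (by omega)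
  · rfl

theorem foldl_append_singleton (l : List String) (acc : List String) :
    l.foldl (fun a t => a ++ [t]) acc = acc ++ l := by
  induction l generalizing acc with
  | nil => simp
  | cons x xs ih => simp [List.foldl_cons, ih]

-- A's tadlist is the flat concatenation of the matched tads
theorem tadlist_eq_flatMap (targetGenes : List (String × List String)) :
    ∀ (qs : List String) (acc : List String),
      qs.foldl (fun acc geneID =>
        match (PySem.Dict.mk targetGenes).get? geneID with
        | none => acc
        | some tads => if tads.isEmpty then acc else tads.foldl (fun a t => a ++ [t]) acc) acc
      = acc ++ qs.flatMap (fun g => ((PySem.Dict.mk targetGenes).get? g).getD []) := by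
  intro qs
  induction qs with
  | nil => intro acc; simp
  | cons g gs ih =>
    intro acc
    simp only [List.foldl_cons, List.flatMap_cons, ih]
    cases h : (PySem.Dict.mk targetGenes).get? g with
    | none => simp
    | some tads =>
      cases tads with
      | nil => simp
      | cons t ts =>
        simp only [Option.getD_some, List.isEmpty_cons, Bool.false_eq_true, if_false,
          foldl_append_singleton, List.append_assoc]

-- duplicates never move the running best: folding over l equals folding over the
-- not-yet-seen part of its deduplication
theorem foldl_pvStep_dedup (c : String → Int) :
    ∀ (l : List String) (s : List String) (acc : Int × Option String),
      (∀ t ∈ s, c t ≤ acc.1) →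
      l.foldl (pvStep c) acc
        = ((PySem.Set.ofList l).filter (fun y => !(s.contains y))).foldl (pvStep c) acc := by
  intro l
  induction l with
  | nil => intro s acc _; simp [PySem.Set.ofList]
  | cons x xs ih =>
    intro s acc hs
    rw [PySem.Set.ofList_cons]
    by_cases hx : x ∈ s
    · have hcx : c x ≤ acc.1 := hs x hx
      have hsx : s.contains x = true := by simpa using hx
      rw [List.foldl_cons, pvStep_of_le c acc x hcx, ih s acc hs,
        List.filter_cons_of_neg (by simp [hx])]
      congr 1
      simp only [PySem.Set.discard, List.filter_filter]
      apply List.filter_congr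
      intro y hy
      by_cases hyx : y = x
      · subst hyx; simp [hx]
      · simp [hyx]
    · have hsx : s.contains x = false := by simpa using hx
      rw [List.filter_cons_of_pos (by simp [hx]), List.foldl_cons, List.foldl_cons]
      have hinv : ∀ t ∈ x :: s, c t ≤ (pvStep c acc x).1 := by
        intro t ht
        rcases List.mem_cons.mp ht with h | h
        · subst h; exact pvStep_fst_ge c acc t
        · exact le_trans (hs t h) (pvStep_fst_le c acc x)
      rw [ih (x :: s) (pvStep c acc x) hinv]
      congr 1
      simp only [PySem.Set.discard, List.filter_filter]
      apply List.filter_congr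
      intro y hy
      by_cases hyx : y = x <;> simp [hyx, Bool.and_comm]

-- dedup commutes with removing one value
theorem ofList_filter_ne (t : String) :
    ∀ (xs : List String),
      PySem.Set.ofList (xs.filter (fun x => x ≠ t)) = PySem.Set.discard (PySem.Set.ofList xs) t := by
  intro xs
  induction xs with
  | nil => rfl
  | cons x xs ih =>
    by_cases hx : x = t
    · subst hx
      rw [List.filter_cons_of_neg (by simp), ih, PySem.Set.ofList_cons]
      simp only [PySem.Set.discard, List.filter_cons, List.filter_filter]
      rw [if_neg (by simp)]
      apply List.filter_congr; intro y _; by_cases h : y = x <;> simp [h]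
    · rw [List.filter_cons_of_pos (by simp [hx]), PySem.Set.ofList_cons, ih, PySem.Set.ofList_cons]
      simp only [PySem.Set.discard, List.filter_cons, List.filter_filter]
      rw [if_pos (by simp [hx])]
      congr 1
      apply List.filter_congr; intro y _
      exact Bool.and_comm _ _

-- the length drop after stripping t is t's count
theorem length_sub_filter_ne (t : String) (l : List String) :
    l.length = (l.filter (fun x => x ≠ t)).length + l.count t := by
  induction l with
  | nil => simp
  | cons x xs ih =>
    by_cases hx : x = t
    · subst hx
      rw [List.filter_cons_of_neg (by simp), List.count_cons_self, List.length_cons, ih]; omega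
    · rw [List.filter_cons_of_pos (by simp [hx]), List.count_cons_of_ne hx, List.length_cons,
        List.length_cons, ih]
      omega

-- counts of survivors are unchanged by stripping t
theorem count_filter_ne (t y : String) (l : List String) (hy : y ≠ t) :
    (l.filter (fun x => x ≠ t)).count y = l.count y := by
  induction l with
  | nil => simp
  | cons x xs ih =>
    by_cases hx : x = t
    · subst hx
      rw [List.filter_cons_of_neg (by simp), ih, List.count_cons_of_ne (Ne.symm hy)]
    · rw [List.filter_cons_of_pos (by simp [hx]), List.count_cons, List.count_cons, ih]

theorem foldl_pvStep_congr (c c' : String → Int) :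
    ∀ (l : List String) (acc : Int × Option String),
      (∀ y ∈ l, c y = c' y) → l.foldl (pvStep c) acc = l.foldl (pvStep c') acc := by
  intro l
  induction l with
  | nil => intro acc _; rfl
  | cons x xs ih =>
    intro acc h
    rw [List.foldl_cons, List.foldl_cons]
    have hx : pvStep c acc x = pvStep c' acc x := by unfold pvStep; rw [h x (by simp)]
    rw [hx, ih _ (fun y hy => h y (List.mem_cons_of_mem _ hy))]

-- one unfolding step of the while loop
def pvDrop (t : String) (xs : List String) : Int :=
  (((t :: xs).length : Int) - ((xs.filter (fun x => x ≠ t)).length : Int))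

theorem pvBestLoop_cons_eq (t : String) (xs : List String) (n : Int) (b : Option String) :
    pvBestLoop (t :: xs) n b
      = if pvDrop t xs > n
          then pvBestLoop (xs.filter (fun x => x ≠ t)) (pvDrop t xs) (some t)
          else pvBestLoop (xs.filter (fun x => x ≠ t)) n b := by
  rw [pvBestLoop]
  simp [pvDrop]

-- the computed length drop is the head's count in the current rest
theorem drop_eq_count (t : String) (xs : List String) :
    pvDrop t xs = (((t :: xs).count t : Nat) : Int) := by
  have h := length_sub_filter_ne t (t :: xs)
  have hx : (t :: xs).filter (fun x => x ≠ t) = xs.filter (fun x => x ≠ t) := by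
    simp
  unfold pvDrop
  rw [← hx]
  omega

theorem pvStep_head (t : String) (xs : List String) (n : Int) (b : Option String) :
    pvStep (fun t' => (((t :: xs).count t' : Nat) : Int)) (n, b) t
      = if pvDrop t xs > n then (pvDrop t xs, some t) else (n, b) := by
  unfold pvStep
  rw [drop_eq_count]

-- the tail fold: counts of survivors are unchanged by stripping the head's value
theorem foldl_tail (t : String) (xs : List String) (acc : Int × Option String) :
    (PySem.Set.discard (PySem.Set.ofList xs) t).foldl
        (pvStep (fun t' => (((t :: xs).count t' : Nat) : Int))) acc
      = (PySem.Set.ofList (xs.filter (fun x => x ≠ t))).foldl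
        (pvStep (fun t' => (((xs.filter (fun x => x ≠ t)).count t' : Nat) : Int))) acc := by
  rw [ofList_filter_ne]
  apply foldl_pvStep_congr
  intro y hy
  have hyt : y ≠ t :=
    ((PySem.Set.mem_discard (s := PySem.Set.ofList xs) (x := t) (y := y)).mp hy).2
  rw [count_filter_ne t y xs hyt, List.count_cons_of_ne (Ne.symm hyt)]

-- B's while loop is the strict-> running best over the deduplicated list with counts of `rest`
theorem pvBestLoop_eq (rest : List String) (n : Int) (b : Option String) :
    pvBestLoop rest n b
      = ((PySem.Set.ofList rest).foldl (pvStep (fun t => (rest.count t : Int))) (n, b)).2 := by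
  induction rest, n, b using pvBestLoop.induct with
  | case1 n b => simp [pvBestLoop, PySem.Set.ofList]
  | case2 t xs nBest best smaller c h ih =>
    have hsm : smaller = xs.filter (fun x => x ≠ t) := by
      simp only [smaller, List.filter_cons]; simp
    have hc : c = pvDrop t xs := by simp only [c, hsm, pvDrop]
    rw [hsm] at ih
    rw [hc] at ih h
    rw [pvBestLoop_cons_eq t xs nBest best, if_pos h, ih, PySem.Set.ofList_cons, List.foldl_cons,
      pvStep_head t xs nBest best, if_pos h, foldl_tail t xs]
  | case3 t xs nBest best smaller c h ih =>
    have hsm : smaller = xs.filter (fun x => x ≠ t) := by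
      simp only [smaller, List.filter_cons]; simp
    have hc : c = pvDrop t xs := by simp only [c, hsm, pvDrop]
    rw [hsm] at ih
    rw [hc] at h
    rw [pvBestLoop_cons_eq t xs nBest best, if_neg h, ih, PySem.Set.ofList_cons, List.foldl_cons,
      pvStep_head t xs nBest best, if_neg h, foldl_tail t xs]

-- ===== VERDICT (by name: the statement is the Claim_ definition above) =====
theorem findMatchingTAD_spec : Claim_equal_findMatchingTAD := by
  intro queryGenes targetGenes _
  unfold Spec_findMatchingTAD findMatchingTAD findMatchingTAD_alt
  rw [tadlist_eq_flatMap]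
  simp only [List.nil_append]
  set L : List String := queryGenes.flatMap (fun g => ((PySem.Dict.mk targetGenes).get? g).getD []) with hL
  have hA : (fun (acc : Int × Option String) tad =>
      let n : Int := (PySem.List.count L tad : Nat)
      if n > acc.1 then (n, some tad) else acc) = pvStep (fun t => ((L.count t : Nat) : Int)) := by
    funext acc tad
    show (if ((PySem.List.count L tad : Nat) : Int) > acc.1
        then (((PySem.List.count L tad : Nat) : Int), some tad) else acc) = _
    rfl
  rw [hA, pvBestLoop_eq L 0 none,
    foldl_pvStep_dedup (fun t => ((L.count t : Nat) : Int)) L [] ((0 : Int), none) (by simp)]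
  simp
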